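-- pv_equiv track=rewrite | github.com/Prasoon2808/GDS-PYTHON | GDS last stable version.py | _best_grid_dims
-- ===== SOURCE A (Python) =====
-- from math import ceil, sqrt, floor
--
-- def _best_grid_dims(n):
--     if n<=0: return (1,1)
--     r=int(sqrt(n)); best=None
--     for h in range(1,r+1):
--         if n%h==0:
--             w=n//h
--             if best is None or abs(w-h)<abs(best[0]-best[1]): best=(w,h)
--     if best: return best
--     w=int(ceil(sqrt(n))); h=int(ceil(n/w)); return (w,h)
-- ===== SOURCE B (Python) =====
-- from math import isqrt
--
-- def _best_grid_dims(n):
--     if n <= 0: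
--         return (1, 1)
--     h = isqrt(n)
--     while n % h:
--         h -= 1
--     return (n // h, h)
-- ===== Notes on version B (the rewrite author's own statement) =====
-- stated objective: simpler
-- what changed: Replaces the full upward scan with best-pair tracking and abs comparisons by a downward scan from isqrt(n) that returns at the first divisor (the largest h <= sqrt(n)), dropping the accumulator and the unreachable ceil fallback.
import Mathlib
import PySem

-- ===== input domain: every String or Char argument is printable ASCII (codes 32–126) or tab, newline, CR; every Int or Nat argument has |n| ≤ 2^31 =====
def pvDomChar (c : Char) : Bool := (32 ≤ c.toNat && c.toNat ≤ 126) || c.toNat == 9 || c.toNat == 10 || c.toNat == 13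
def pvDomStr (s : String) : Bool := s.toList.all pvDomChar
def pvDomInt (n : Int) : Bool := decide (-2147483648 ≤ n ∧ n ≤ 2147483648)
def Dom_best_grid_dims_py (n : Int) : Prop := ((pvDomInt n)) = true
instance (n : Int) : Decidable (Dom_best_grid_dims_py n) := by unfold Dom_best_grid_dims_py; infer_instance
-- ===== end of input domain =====

-- B replaces A's full upward scan with best-pair tracking by a downward scan from isqrt(n)
-- returning at the first divisor (objective: simpler).

-- ===== PORT A =====
-- loop body of A's for-loop (kept as a named helper, code identical to A's body)
def pvStepA (n : Int) (best : Option (Int × Int)) (h : Int) : Option (Int × Int) :=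
  if PySem.Int.mod n h = 0 then
    let w := PySem.Int.floordiv n h
    match best with
    | none => some (w, h)
    | some b => if |w - h| < |b.1 - b.2| then some (w, h) else some b
  else best

def best_grid_dims_py (n : Int) : Int × Int :=
  if n ≤ 0 then (1, 1)
  else
    -- int(sqrt(n)): float sqrt is exact enough that int(sqrt(n)) = isqrt(n) for 0 ≤ n ≤ 2^31
    let r : Int := (Nat.sqrt n.toNat : Int)
    let best := (PySem.List.pyRange 1 (r + 1) 1).foldl (pvStepA n) none
    match best with
    | some b => b
    | none =>
      -- unreachable for n ≥ 1 (h = 1 always divides); ported exactly: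
      -- int(ceil(sqrt(n))) and int(ceil(n/w)), exact on the domain
      let s : Int := (Nat.sqrt n.toNat : Int)
      let w := if s * s = n then s else s + 1
      let h := -(PySem.Int.floordiv (-n) w)
      (w, h)

-- ===== PORT B =====
-- B's while loop 'while n % h: h -= 1' as fuel recursion on h (fuel 0 unreachable: 1 divides n)
def pvFindDiv (n : Int) : Nat → Int
  | 0 => 1
  | (k+1) => if PySem.Int.mod n ((k : Int) + 1) = 0 then (k : Int) + 1 else pvFindDiv n k

def best_grid_dims_py_alt (n : Int) : Int × Int :=
  if n ≤ 0 then (1, 1)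
  else
    let h := pvFindDiv n (Nat.sqrt n.toNat)
    (PySem.Int.floordiv n h, h)

-- ===== PRECONDITION & SPEC =====
def Spec_best_grid_dims_py (n : Int) (out : Int × Int) : Prop := out = best_grid_dims_py_alt n
instance (n : Int) (out : Int × Int) : Decidable (Spec_best_grid_dims_py n out) := by unfold Spec_best_grid_dims_py; infer_instance

-- ===== CLAIM (what is proved, stated in full; the proofs are below) =====
def Claim_equal_best_grid_dims_py : Prop := ∀ (n : Int), Dom_best_grid_dims_py n → Spec_best_grid_dims_py n (best_grid_dims_py n)

-- ===== LEMMAS AND PROOFS =====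

-- exact division: floordiv n d = w when n = d * w, 0 < d
lemma pv_floordiv_exact (n d w : Int) (hd : 0 < d) (hw : n = d * w) :
    PySem.Int.floordiv n d = w := by
  rw [PySem.Int.floordiv_eq_ediv_of_pos hd, hw, Int.mul_ediv_cancel_left _ (by omega)]

-- the larger of two divisors ≤ √n gives the strictly smaller |w - h|
lemma pv_improve (n d1 d2 : Int) (h1 : 1 ≤ d1) (h12 : d1 < d2)
    (hd1 : d1 ∣ n) (hd2 : d2 ∣ n) (hsq : d2 * d2 ≤ n) :
    |PySem.Int.floordiv n d2 - d2| < |PySem.Int.floordiv n d1 - d1| := by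
  obtain ⟨w1, hw1⟩ := hd1
  obtain ⟨w2, hw2⟩ := hd2
  rw [pv_floordiv_exact n d1 w1 (by omega) hw1, pv_floordiv_exact n d2 w2 (by omega) hw2]
  have heq : d1 * w1 = d2 * w2 := by rw [← hw1, ← hw2]
  have hd2w2 : d2 ≤ w2 := le_of_mul_le_mul_left (by omega) (by omega : (0:Int) < d2)
  have hw2w1 : w2 < w1 := by nlinarith [heq, hd2w2]
  rw [abs_of_nonneg (by omega), abs_of_nonneg (by omega)]
  omega

lemma pv_findDiv_bounds (n : Int) (_hn : 1 ≤ n) (k : Nat) (hk : 1 ≤ k) :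
    1 ≤ pvFindDiv n k ∧ pvFindDiv n k ≤ (k : Int) ∧ pvFindDiv n k ∣ n := by
  induction k with
  | zero => omega
  | succ k ih =>
    rw [pvFindDiv]
    by_cases hdvd : PySem.Int.mod n ((k : Int) + 1) = 0
    · rw [if_pos hdvd]
      exact ⟨by omega, le_refl _, (PySem.Int.mod_eq_zero_iff_dvd n _).mp hdvd⟩
    · rw [if_neg hdvd]
      rcases Nat.eq_zero_or_pos k with hk0 | hk0
      · exfalso
        apply hdvd
        subst hk0
        rw [PySem.Int.mod_eq_emod_of_pos (by omega)]
        simp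
      · obtain ⟨a, b, c⟩ := ih hk0
        exact ⟨a, by push_cast; omega, c⟩

-- A's loop invariant: after processing h = 1..k the best pair is (n // d, d) with d = pvFindDiv n k
lemma pv_fold_inv (n : Int) (hn : 1 ≤ n) (k : Nat) (hk : 1 ≤ k)
    (hkr : k ≤ Nat.sqrt n.toNat) :
    (PySem.List.pyRange 1 ((k : Int) + 1) 1).foldl (pvStepA n) none
      = some (PySem.Int.floordiv n (pvFindDiv n k), pvFindDiv n k) := by
  induction k with
  | zero => omega
  | succ k ih =>
    have hsq : ((k : Int) + 1) * ((k : Int) + 1) ≤ n := by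
      have h1 : (k + 1) * (k + 1) ≤ n.toNat := Nat.le_sqrt.mp hkr
      have h2 : ((k + 1) * (k + 1) : Nat) ≤ (n.toNat : Int) := by exact_mod_cast h1
      rw [Int.toNat_of_nonneg (by omega)] at h2
      push_cast at h2
      linarith
    rcases Nat.eq_zero_or_pos k with hk0 | hk0
    · subst hk0
      have h1 : PySem.Int.mod n 1 = 0 := by
        rw [PySem.Int.mod_eq_emod_of_pos (by omega)]; simp
      have hrg : PySem.List.pyRange 1 2 1 = [1] := by decide
      have hf1 : PySem.Int.floordiv n 1 = n := pv_floordiv_exact n 1 n (by omega) (by ring)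
      have hdv : (1 : Int) ∣ n := one_dvd n
      simp [hrg, pvStepA, pvFindDiv, h1]
      
    · have hrng : PySem.List.pyRange 1 (((k : Int) + 1) + 1) 1
          = PySem.List.pyRange 1 ((k : Int) + 1) 1 ++ [(k : Int) + 1] := by
        exact PySem.List.pyRange_one_succ_right (by omega)
      have ihk := ih hk0 (le_trans (Nat.le_succ k) hkr)
      have ⟨hb1, hb2, hb3⟩ := pv_findDiv_bounds n hn k hk0
      by_cases hdvd : PySem.Int.mod n ((k : Int) + 1) = 0
      · have himp := pv_improve n (pvFindDiv n k) ((k : Int) + 1) hb1 (by omega) hb3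
          ((PySem.Int.mod_eq_zero_iff_dvd n _).mp hdvd) hsq
        simp only [Nat.cast_succ, hrng, List.foldl_append, ihk, List.foldl_cons,
          List.foldl_nil, pvStepA, pvFindDiv, hdvd]
        simp only [if_true, if_pos himp]
      · simp only [Nat.cast_succ, hrng, List.foldl_append, ihk, List.foldl_cons,
          List.foldl_nil, pvStepA, pvFindDiv, hdvd, if_false]

-- ===== VERDICT (by name: the statement is the Claim_ definition above) =====
theorem best_grid_dims_py_spec : Claim_equal_best_grid_dims_py := by
  intro n _
  unfold Spec_best_grid_dims_py best_grid_dims_py best_grid_dims_py_alt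
  by_cases hn : n ≤ 0
  · simp [hn]
  · have hn1 : 1 ≤ n := by omega
    have hr : 1 ≤ Nat.sqrt n.toNat := Nat.sqrt_pos.mpr (by omega)
    have hfold := pv_fold_inv n hn1 (Nat.sqrt n.toNat) hr le_rfl
    simp only [if_neg hn, hfold]
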